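-- pv_equiv track=rewrite | github.com/sproutsai-engg/coding_question_generator | json_files/python_codes/Q_1593.py | maxUniqueSplit
-- ===== SOURCE A (Python) =====
-- def maxUniqueSplit(s, start=0, seen=None):
--     if seen is None:
--         seen = set()
--     if start == len(s):
--         return 0
--     maxUnique = -1
--     for i in range(start + 1, len(s) + 1):
--         sub = s[start:i]
--         if sub not in seen:
--             seen.add(sub)
--             unique = maxUniqueSplit(s, i, seen)
--             if unique != -1:
--                 maxUnique = max(maxUnique, unique + 1)
--             seen.remove(sub)
--     return maxUnique
-- ===== SOURCE B (Python) =====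
-- def maxUniqueSplit(s, start=0, seen=None):
--     # Breadth-first generate-and-test: sweep the cut positions left to right,
--     # growing a frontier of valid partial splits (position, pieces-so-far);
--     # no recursion and no backtracking.
--     n = len(s)
--     banned = set() if seen is None else set(seen)
--     if start == n:
--         return 0
--     if start > n:
--         return -1  # no sequence of cuts reaches the end of the string
--     states = [(start, frozenset())]
--     for c in range(start + 1, n):
--         grown = []
--         for prev, pieces in states:
--             piece = s[prev:c]
--             if piece not in banned and piece not in pieces:
--                 grown.append((c, pieces | {piece}))
--         states += grown
--     best = -1
--     for prev, pieces in states: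
--         last = s[prev:n]
--         if last not in banned and last not in pieces:
--             best = max(best, len(pieces) + 1)
--     return best
-- ===== Notes on version B (the rewrite author's own statement) =====
-- stated objective: alternative
-- what changed: A's depth-first recursive backtracking (add to a shared mutable seen-set, recurse, remove, -1 sentinel threading) is replaced by an iterative breadth-first sweep: cut positions are processed left to right while a frontier of valid partial splits (position, pieces-so-far) is grown, and the answer is the maximum piece count over the completed splits.
import Mathlib
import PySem

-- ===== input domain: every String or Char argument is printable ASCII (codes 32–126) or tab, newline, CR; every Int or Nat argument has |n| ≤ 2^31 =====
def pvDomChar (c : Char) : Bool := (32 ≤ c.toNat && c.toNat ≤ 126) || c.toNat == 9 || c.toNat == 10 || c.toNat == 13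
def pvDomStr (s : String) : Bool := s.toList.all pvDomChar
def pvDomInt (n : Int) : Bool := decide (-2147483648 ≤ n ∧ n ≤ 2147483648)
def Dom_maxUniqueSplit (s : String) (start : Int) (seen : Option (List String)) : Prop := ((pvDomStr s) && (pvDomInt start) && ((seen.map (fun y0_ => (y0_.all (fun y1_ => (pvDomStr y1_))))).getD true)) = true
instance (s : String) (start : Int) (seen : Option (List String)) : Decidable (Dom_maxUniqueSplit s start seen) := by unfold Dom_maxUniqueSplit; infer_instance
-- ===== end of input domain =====

-- B replaces A's recursive backtracking (add/recurse/remove on a shared seen-set) by a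
-- breadth-first sweep: cut positions are processed left to right while a frontier of valid
-- partial splits is grown, and the maximum piece count is read off the completed ones.
-- Objective: alternative algorithm, same return value (A mutates its `seen` argument only
-- transiently and leaves it net-unchanged; the equivalence is about the return value).

-- ===== PORT A =====
-- the recursion of A (seen is never None in recursive calls); `.attach` only carries the
-- range-membership proof used for termination.
def pvGoA (s : List Char) (start : Int) (seen : PySem.Set (List Char)) : Int :=
  if start = (s.length : Int) then 0
  else
    ((PySem.List.pyRange (start + 1) ((s.length : Int) + 1)).attach.foldl
      (fun st ip =>
        let sub := PySem.List.slice s (some start) (some ip.val)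
        if PySem.Set.contains st.1 sub then st
        else
          let seen1 := PySem.Set.add st.1 sub
          let unique := pvGoA s ip.val seen1
          let st2 := if unique ≠ -1 then (seen1, max st.2 (unique + 1)) else (seen1, st.2)
          -- seen.remove(sub): sub was just added, so KeyError is impossible and discard is exact
          (PySem.Set.discard st2.1 sub, st2.2))
      (seen, -1)).2
termination_by ((s.length : Int) - start).toNat
decreasing_by
  have h := (PySem.List.mem_pyRange_one).1 ip.2
  omega

-- 'if seen is None: seen = set()' + boundary conversion set[str] → distinct List (List Char)
def maxUniqueSplit (s : String) (start : Int) (seen : Option (List String)) : Int :=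
  pvGoA s.toList start
    (match seen with
     | none => PySem.Set.empty
     | some l => PySem.Set.ofList (l.map String.toList))

-- ===== PORT B =====
-- breadth-first generate-and-test over a frontier of valid partial splits
def maxUniqueSplit_alt (s : String) (start : Int) (seen : Option (List String)) : Int :=
  let t := s.toList
  let n : Int := (t.length : Int)
  let banned : PySem.Set (List Char) :=
    match seen with
    | none => PySem.Set.empty
    | some l => PySem.Set.ofList (l.map String.toList)
  if start = n then 0
  else if n < start then -1  -- start beyond the end: no sequence of cuts reaches n
  else
    let states := (PySem.List.pyRange (start + 1) n).foldl
      (fun states c =>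
        states ++ states.filterMap (fun st =>
          let piece := PySem.List.slice t (some st.1) (some c)
          if PySem.Set.contains banned piece || PySem.Set.contains st.2 piece then none
          else some (c, PySem.Set.add st.2 piece)))
      [(start, (PySem.Set.empty : PySem.Set (List Char)))]
    states.foldl
      (fun best st =>
        let last := PySem.List.slice t (some st.1) (some n)
        if PySem.Set.contains banned last || PySem.Set.contains st.2 last then best
        else max best (((st.2.length : Int)) + 1))
      (-1)

-- ===== PRECONDITION & SPEC =====
def Spec_maxUniqueSplit (s : String) (start : Int) (seen : Option (List String)) (out : Int) : Prop := out = maxUniqueSplit_alt s start seen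
instance (s : String) (start : Int) (seen : Option (List String)) (out : Int) : Decidable (Spec_maxUniqueSplit s start seen out) := by unfold Spec_maxUniqueSplit; infer_instance

-- ===== CLAIM (what is proved, stated in full; the proofs are below) =====
def Claim_equal_maxUniqueSplit : Prop := ∀ (s : String) (start : Int) (seen : Option (List String)), Dom_maxUniqueSplit s start seen → Spec_maxUniqueSplit s start seen (maxUniqueSplit s start seen)

-- ===== LEMMAS AND PROOFS =====

-- value (piece count) of one chosen cut list, evaluated against one merged seen-set
def pvVal (s : List Char) (n : Int) : List Int → Int → PySem.Set (List Char) → Option Int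
  | [], prev, seen =>
    if PySem.Set.contains seen (PySem.List.slice s (some prev) (some n)) then none else some 1
  | c :: cs, prev, seen =>
    let p := PySem.List.slice s (some prev) (some c)
    if PySem.Set.contains seen p then none
    else Option.map (· + 1) (pvVal s n cs c (PySem.Set.add seen p))

-- the subset list B materializes
def pvT (cuts : List Int) : List (List Int) :=
  cuts.foldl (fun acc c => acc ++ acc.map (fun chosen => chosen ++ [c])) [[]]

-- max with default -1
def pvMX (l : List Int) : Int := l.foldl max (-1)

-- one frontier-extension step (the port's inner lambda)
def pvExt (t : List Char) (banned : PySem.Set (List Char)) (c : Int)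
    (st : Int × PySem.Set (List Char)) : Option (Int × PySem.Set (List Char)) :=
  let piece := PySem.List.slice t (some st.1) (some c)
  if PySem.Set.contains banned piece || PySem.Set.contains st.2 piece then none
  else some (c, PySem.Set.add st.2 piece)

-- the final check of one frontier state
def pvFin (t : List Char) (banned : PySem.Set (List Char)) (n : Int)
    (st : Int × PySem.Set (List Char)) : Option Int :=
  let last := PySem.List.slice t (some st.1) (some n)
  if PySem.Set.contains banned last || PySem.Set.contains st.2 last then none
  else some (((st.2.length : Int)) + 1)

-- walking one chosen cut list to its frontier state
def pvPWalk (t : List Char) (banned : PySem.Set (List Char)) :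
    List Int → Int → PySem.Set (List Char) → Option (Int × PySem.Set (List Char))
  | [], prev, P => some (prev, P)
  | c :: cs, prev, P =>
    let piece := PySem.List.slice t (some prev) (some c)
    if PySem.Set.contains banned piece || PySem.Set.contains P piece then none
    else pvPWalk t banned cs c (PySem.Set.add P piece)

lemma pvFoldlMaxComm (l : List Int) : ∀ (m b : Int), l.foldl max (max m b) = max b (l.foldl max m) := by
  induction l with
  | nil => intro m b; simp [max_comm]
  | cons x t ih =>
    intro m b
    have h : max (max m b) x = max (max m x) b := by omega
    rw [List.foldl_cons, h, ih, List.foldl_cons]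

lemma pvMXge (l : List Int) : -1 ≤ pvMX l := (PySem.List.le_foldl_max l (-1)).1

lemma pvMXcons (x : Int) (l : List Int) : pvMX (x :: l) = max x (pvMX l) := by
  show (x :: l).foldl max (-1) = max x (l.foldl max (-1))
  rw [List.foldl_cons]
  exact pvFoldlMaxComm l (-1) x

-- max over an interleaved pair-flatMap splits into two halves
lemma pvMXpairFlat {α : Type} (T : List α) (u v : α → Int) :
    pvMX (T.flatMap (fun t => [u t, v t])) = max (pvMX (T.map u)) (pvMX (T.map v)) := by
  induction T with
  | nil => simp [pvMX]
  | cons x T ih =>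
    simp only [List.flatMap_cons, List.map_cons, List.cons_append, List.nil_append]
    rw [pvMXcons, pvMXcons, pvMXcons, pvMXcons, ih]
    omega

-- filterMap of Options with values ≥ -1 can be read as map with default -1
lemma pvMXfilterMap {α : Type} (l : List α) (f : α → Option Int) :
    pvMX (l.filterMap f) = pvMX (l.map (fun t => (f t).getD (-1))) := by
  induction l with
  | nil => rfl
  | cons x l ih =>
    cases hx : f x with
    | none =>
      simp only [List.filterMap_cons, hx, List.map_cons, Option.getD_none]
      rw [ih, pvMXcons]
      have := pvMXge (l.map (fun t => (f t).getD (-1)))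
      omega
    | some v =>
      simp only [List.filterMap_cons, hx, List.map_cons, Option.getD_some]
      rw [pvMXcons, pvMXcons, ih]

-- the subsets fold with a general initial segment list
lemma pvTgen (cs : List Int) : ∀ (init : List (List Int)),
    cs.foldl (fun acc c => acc ++ acc.map (fun chosen => chosen ++ [c])) init
      = (pvT cs).flatMap (fun t => init.map (· ++ t)) := by
  induction cs with
  | nil => intro init; simp [pvT]
  | cons c cs ih =>
    intro init
    have hT : pvT (c :: cs) = (pvT cs).flatMap (fun t => [[], [c]].map (· ++ t)) := by
      rw [pvT, List.foldl_cons]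
      have h : (([[]] : List (List Int)) ++ [[]].map (fun chosen => chosen ++ [c])) = [[], [c]] := by
        simp
      rw [h, ih]
    rw [List.foldl_cons, ih, hT, List.flatMap_assoc]
    have hfun : ∀ t : List Int,
        (init ++ init.map (fun chosen => chosen ++ [c])).map (· ++ t)
          = (([[], [c]].map (· ++ t)).flatMap (fun u => init.map (· ++ u))) := by
      intro t
      simp [List.map_append, Function.comp, List.append_assoc]
    simp only [hfun]


lemma pvTcons (a : Int) (cs : List Int) :
    pvT (a :: cs) = (pvT cs).flatMap (fun t => [t, a :: t]) := by
  have h : pvT (a :: cs) = (pvT cs).flatMap (fun t => [[], [a]].map (· ++ t)) := by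
    rw [pvT, List.foldl_cons]
    have h1 : (([[]] : List (List Int)) ++ [[]].map (fun chosen => chosen ++ [a])) = [[], [a]] := by
      simp
    rw [h1, pvTgen]
  rw [h]
  simp

lemma pvValPos (s : List Char) (n : Int) :
    ∀ (chosen : List Int) (prev : Int) (seen : PySem.Set (List Char)) (v : Int),
      pvVal s n chosen prev seen = some v → 1 ≤ v := by
  intro chosen
  induction chosen with
  | nil =>
    intro prev seen v h
    rw [pvVal] at h
    split at h
    · exact absurd h (by simp)
    · obtain rfl : (1 : Int) = v := Option.some_inj.mp h
      omega
  | cons c cs ih =>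
    intro prev seen v h
    rw [pvVal] at h
    split at h
    · exact absurd h (by simp)
    · obtain ⟨w, hw, rfl⟩ := Option.map_eq_some_iff.mp h
      have := ih c (PySem.Set.add seen (PySem.List.slice s (some prev) (some c))) w hw
      omega

-- split the max over the pair-structured subset list (take-a vs skip-a)
lemma pvMXsplit {F : List Int → Option Int} (T : List (List Int)) (a : Int) :
    pvMX ((T.flatMap (fun t => [t, a :: t])).filterMap F)
      = max (pvMX (T.filterMap F)) (pvMX (T.filterMap (fun t => F (a :: t)))) := by
  rw [pvMXfilterMap _ F, pvMXfilterMap _ F, pvMXfilterMap _ (fun t => F (a :: t))]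
  rw [List.map_flatMap]
  have h : ∀ t : List Int,
      ([t, a :: t].map (fun u => (F u).getD (-1)))
        = [(F t).getD (-1), (F (a :: t)).getD (-1)] := by intro t; simp
  simp only [h]
  exact pvMXpairFlat T _ _

lemma pvMXmapSucc (X : List Int) (hX : ∀ v ∈ X, 1 ≤ v) :
    pvMX (X.map (· + 1)) = if pvMX X = -1 then -1 else pvMX X + 1 := by
  induction X with
  | nil => simp [pvMX]
  | cons x l ih =>
    have hx : 1 ≤ x := hX x (by simp)
    have hl := pvMXge l
    rw [List.map_cons, pvMXcons, pvMXcons, ih (fun v hv => hX v (by simp [hv]))]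
    split_ifs <;> omega

-- A's backtracking loop, with the running seen-set restored each iteration, equals a
-- filterMap of the successful candidates folded with max
lemma pvDiscardAdd {x : List Char} {s : PySem.Set (List Char)}
    (h : PySem.Set.contains s x = false) :
    PySem.Set.discard (PySem.Set.add s x) x = s := by
  have hx : x ∉ s := by simpa [PySem.Set.contains] using h
  simp only [PySem.Set.add, PySem.Set.discard]
  rw [if_neg (by simp [hx]), List.filter_append, List.filter_eq_self.mpr, List.filter_cons]
  · simp
  · intro y hy
    simp only [Bool.not_eq_eq_eq_not, Bool.not_true, beq_eq_false_iff_ne, ne_eq]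
    exact fun e => hx (e ▸ hy)

lemma pvFoldA {α : Type} (s : List Char) (start : Int) (seen : PySem.Set (List Char))
    (v : α → Int) (u : Int → PySem.Set (List Char) → Int) (l : List α) (m : Int) :
    (l.foldl
      (fun st ip =>
        let sub := PySem.List.slice s (some start) (some (v ip))
        if PySem.Set.contains st.1 sub then st
        else
          let seen1 := PySem.Set.add st.1 sub
          let unique := u (v ip) seen1
          let st2 := if unique ≠ -1 then (seen1, max st.2 (unique + 1)) else (seen1, st.2)
          (PySem.Set.discard st2.1 sub, st2.2))
      (seen, m))
    = (seen, (l.filterMap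
        (fun ip =>
          let sub := PySem.List.slice s (some start) (some (v ip))
          if PySem.Set.contains seen sub then none
          else
            let unique := u (v ip) (PySem.Set.add seen sub)
            if unique ≠ -1 then some (unique + 1) else none)).foldl max m) := by
  induction l generalizing m with
  | nil => rfl
  | cons x t ih =>
    simp only [List.foldl_cons, List.filterMap_cons]
    by_cases hc : PySem.Set.contains seen (PySem.List.slice s (some start) (some (v x))) = true
    · simp only [hc, if_true, ih]
    · rw [Bool.not_eq_true] at hc
      by_cases hu : u (v x) (PySem.Set.add seen (PySem.List.slice s (some start) (some (v x)))) = -1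
      · simp only [hc, Bool.false_eq_true, if_false, hu, ne_eq, not_true_eq_false,
          pvDiscardAdd hc, ih]
      · simp only [hc, Bool.false_eq_true, if_false, ne_eq, hu, not_false_eq_true, if_true,
          pvDiscardAdd hc, ih, List.foldl_cons]

-- contains over a fold of adds distributes
lemma pvContainsFold (P : List (List Char)) : ∀ (banned : PySem.Set (List Char)) (x : List Char),
    PySem.Set.contains (P.foldl PySem.Set.add banned) x
      = (PySem.Set.contains banned x || PySem.Set.contains P x) := by
  induction P with
  | nil => intro banned x; simp
  | cons p P ih =>
    intro banned x
    rw [List.foldl_cons, ih]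
    have hadd : PySem.Set.contains (PySem.Set.add banned p) x
        = (PySem.Set.contains banned x || (x == p)) := by
      rw [Bool.eq_iff_iff]
      simp [PySem.Set.mem_add]
    rw [hadd]
    rw [Bool.eq_iff_iff]
    simp
    tauto

-- appending one cut to a chosen list extends its walk by one step
lemma pvWalkSnoc (t : List Char) (banned : PySem.Set (List Char)) :
    ∀ (cs : List Int) (c prev : Int) (P : PySem.Set (List Char)),
      pvPWalk t banned (cs ++ [c]) prev P
        = (pvPWalk t banned cs prev P).bind (pvExt t banned c) := by
  intro cs
  induction cs with
  | nil =>
    intro c prev P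
    simp only [List.nil_append, pvPWalk, pvExt, Option.bind_some]
  | cons d cs ih =>
    intro c prev P
    simp only [List.cons_append, pvPWalk]
    by_cases hc : (PySem.Set.contains banned (PySem.List.slice t (some prev) (some d))
        || PySem.Set.contains P (PySem.List.slice t (some prev) (some d))) = true
    · have hm := hc
      simp at hm
      simp [hm]
    · rw [Bool.not_eq_true] at hc
      have hm := hc
      simp at hm
      simp [hm, ih]

lemma pvTsnoc (l : List Int) (c : Int) :
    pvT (l ++ [c]) = pvT l ++ (pvT l).map (fun chosen => chosen ++ [c]) := by
  rw [pvT, pvT, List.foldl_append]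
  rfl

-- the frontier after sweeping the cuts l is the walk of every materialized subset
lemma pvFrontier (t : List Char) (banned : PySem.Set (List Char)) (start : Int) (l : List Int) :
    l.foldl (fun states c => states ++ states.filterMap (pvExt t banned c))
        [(start, (PySem.Set.empty : PySem.Set (List Char)))]
      = (pvT l).filterMap
          (fun chosen => pvPWalk t banned chosen start PySem.Set.empty) := by
  induction l using List.reverseRecOn with
  | nil => rfl
  | append_singleton l c ih =>
    rw [List.foldl_append, List.foldl_cons, List.foldl_nil, ih, pvTsnoc,
        List.filterMap_append, List.filterMap_map]
    congr 1
    rw [List.filterMap_filterMap]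
    apply List.filterMap_congr
    intro chosen _
    exact (pvWalkSnoc t banned chosen c start PySem.Set.empty).symm

-- walking a chosen list and applying the final check equals pvVal on the merged
-- seen-set, shifted by |P|
lemma pvPWalkEq (t : List Char) (banned : PySem.Set (List Char)) (n : Int) :
    ∀ (chosen : List Int) (prev : Int) (P : PySem.Set (List Char)),
      (pvPWalk t banned chosen prev P).bind (pvFin t banned n)
        = Option.map (fun v => v + (P.length : Int))
            (pvVal t n chosen prev (P.foldl PySem.Set.add banned)) := by
  intro chosen
  induction chosen with
  | nil =>
    intro prev P
    rw [pvVal, pvContainsFold]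
    simp only [pvPWalk, Option.bind_some, pvFin]
    by_cases hc : (PySem.Set.contains banned (PySem.List.slice t (some prev) (some n))
        || PySem.Set.contains P (PySem.List.slice t (some prev) (some n))) = true
    · rw [hc]
      simp [hc]
    · rw [Bool.not_eq_true] at hc
      rw [hc]
      simp [hc]
      omega
  | cons c cs ih =>
    intro prev P
    rw [pvVal, pvContainsFold]
    simp only [pvPWalk]
    by_cases hc : (PySem.Set.contains banned (PySem.List.slice t (some prev) (some c))
        || PySem.Set.contains P (PySem.List.slice t (some prev) (some c))) = true
    · rw [hc]
      simp [hc]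
    · rw [Bool.not_eq_true] at hc
      rw [hc]
      simp only [Bool.false_eq_true, if_false]
      have hP : PySem.Set.contains P (PySem.List.slice t (some prev) (some c)) = false := by
        simp only [Bool.or_eq_false_iff] at hc; exact hc.2
      have haddlist : PySem.Set.add P (PySem.List.slice t (some prev) (some c))
          = P ++ [PySem.List.slice t (some prev) (some c)] := by
        rw [PySem.Set.add, if_neg (by simpa using hP)]
      have hfold : (PySem.Set.add P (PySem.List.slice t (some prev) (some c))).foldl
            PySem.Set.add banned
          = PySem.Set.add (P.foldl PySem.Set.add banned)
              (PySem.List.slice t (some prev) (some c)) := by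
        rw [haddlist, List.foldl_append]; rfl
      rw [ih, hfold]
      cases hV : pvVal t n cs c (PySem.Set.add (P.foldl PySem.Set.add banned)
          (PySem.List.slice t (some prev) (some c))) with
      | none => simp
      | some v =>
        rw [haddlist]
        simp only [Option.map_some, Option.map_map, Option.some.injEq, Function.comp,
          List.length_append, List.length_cons, List.length_nil]
        push_cast
        omega

-- an option-max fold is the max of the filterMapped values
lemma pvFoldOptMax {α : Type} (l : List α) (f : α → Option Int)
    (hf : ∀ t v, f t = some v → -1 ≤ v) : ∀ (m : Int), -1 ≤ m →
    l.foldl (fun b t => match f t with | none => b | some v => max b v) m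
      = max m (pvMX (l.filterMap f)) := by
  induction l with
  | nil => intro m hm; simp [pvMX]; omega
  | cons x l ih =>
    intro m hm
    rw [List.foldl_cons, List.filterMap_cons]
    cases hx : f x with
    | none => simp only [hx]; exact ih m hm
    | some v =>
      have hv := hf x v hx
      simp only [hx]
      rw [ih (max m v) (by omega), pvMXcons]
      have := pvMXge (l.filterMap f)
      omega

-- empty range
lemma pvRangeNil (a b : Int) (h : b ≤ a) : PySem.List.pyRange a b = [] :=
  List.eq_nil_of_length_eq_zero (by rw [PySem.List.length_pyRange_one]; omega)

lemma pvGoAEnd (s : List Char) (se : PySem.Set (List Char)) : pvGoA s (s.length : Int) se = 0 := by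
  rw [pvGoA]; simp

-- A's loop-body candidate at position i, seen fixed
def pvCandA (s : List Char) (prev : Int) (seen : PySem.Set (List Char)) (i : Int) : Option Int :=
  if PySem.Set.contains seen (PySem.List.slice s (some prev) (some i)) = true then none
  else
    if pvGoA s i (PySem.Set.add seen (PySem.List.slice s (some prev) (some i))) ≠ -1 then
      some (pvGoA s i (PySem.Set.add seen (PySem.List.slice s (some prev) (some i))) + 1)
    else none

-- MAIN: A's recursion equals the max of pvVal over all materialized subsets
lemma pvMain (s : List Char) : ∀ (k : Nat) (prev : Int) (seen : PySem.Set (List Char)),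
    prev < (s.length : Int) → ((s.length : Int) - prev).toNat = k →
    pvGoA s prev seen
      = pvMX ((pvT (PySem.List.pyRange (prev + 1) (s.length : Int))).filterMap
          (fun t => pvVal s (s.length : Int) t prev seen)) := by
  intro k
  induction k using Nat.strong_induction_on with
  | _ k ihs =>
    intro prev seen hlt hk
    -- step 1: A's loop as a filterMap over the candidate range
    have hstep0 : pvGoA s prev seen
        = pvMX ((PySem.List.pyRange (prev + 1) ((s.length : Int) + 1)).filterMap
            (pvCandA s prev seen)) := by
      rw [pvGoA, if_neg (by omega)]
      have h := congrArg Prod.snd (pvFoldA s prev seen Subtype.val (fun i se => pvGoA s i se)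
        ((PySem.List.pyRange (prev + 1) ((s.length : Int) + 1)).attach) (-1))
      simp only at h
      rw [h]
      show pvMX _ = pvMX _
      congr 1
      conv_rhs => rw [← List.attach_map_subtype_val (PySem.List.pyRange (prev + 1) ((s.length : Int) + 1))]
      rw [List.filterMap_map]
      refine List.filterMap_congr (fun ip _ => ?_)
      show _ = pvCandA s prev seen ip.val
      rw [pvCandA]
    -- step 2: peel candidates off the range front, against the subset decomposition
    have hKEY : ∀ (j : Nat) (a : Int), prev < a → a ≤ (s.length : Int) →
        ((s.length : Int) - a).toNat = j →
        pvMX ((PySem.List.pyRange a ((s.length : Int) + 1)).filterMap (pvCandA s prev seen))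
          = pvMX ((pvT (PySem.List.pyRange a (s.length : Int))).filterMap
              (fun t => pvVal s (s.length : Int) t prev seen)) := by
      intro j
      induction j using Nat.strong_induction_on with
      | _ j ihj =>
        intro a ha1 ha2 hj
        by_cases hend : a = (s.length : Int)
        · subst hend
          rw [show PySem.List.pyRange (s.length : Int) ((s.length : Int) + 1)
                = (s.length : Int) :: PySem.List.pyRange ((s.length : Int) + 1) ((s.length : Int) + 1)
              from PySem.List.pyRange_one_cons (by omega),
              pvRangeNil ((s.length : Int) + 1) ((s.length : Int) + 1) (by omega),
              pvRangeNil (s.length : Int) (s.length : Int) (by omega)]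
          by_cases hc : PySem.Set.contains seen
              (PySem.List.slice s (some prev) (some (s.length : Int))) = true
          · have hm := hc
            simp at hm
            have hhead : pvCandA s prev seen (s.length : Int) = none := by
              rw [pvCandA, if_pos hc]
            rw [List.filterMap_cons_none hhead,
                show pvT [] = [[]] from rfl, List.filterMap_cons, pvVal]
            simp [hm]
          · have hm := hc
            simp at hm
            have hhead : pvCandA s prev seen (s.length : Int) = some 1 := by
              rw [pvCandA, if_neg hc, pvGoAEnd]
              simp
            rw [List.filterMap_cons_some hhead,
                show pvT [] = [[]] from rfl, List.filterMap_cons, pvVal]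
            simp [hm]
        · have han : a < (s.length : Int) := lt_of_le_of_ne ha2 hend
          rw [show PySem.List.pyRange a ((s.length : Int) + 1)
                = a :: PySem.List.pyRange (a + 1) ((s.length : Int) + 1)
              from PySem.List.pyRange_one_cons (by omega),
              show PySem.List.pyRange a (s.length : Int)
                = a :: PySem.List.pyRange (a + 1) (s.length : Int)
              from PySem.List.pyRange_one_cons han,
              pvTcons]
          rw [pvMXsplit _ a]
          have hskip := ihj (((s.length : Int) - (a + 1)).toNat) (by omega) (a + 1)
            (by omega) (by omega) rfl
          by_cases hc : PySem.Set.contains seen (PySem.List.slice s (some prev) (some a)) = true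
          · have htake : (pvT (PySem.List.pyRange (a + 1) (s.length : Int))).filterMap
                (fun t => pvVal s (s.length : Int) (a :: t) prev seen) = [] := by
              apply List.filterMap_eq_nil_iff.mpr
              intro t _
              have hm := hc
              simp at hm
              rw [pvVal]
              simp [hm]
            have hhead : pvCandA s prev seen a = none := by
              rw [pvCandA, if_pos hc]
            rw [List.filterMap_cons_none hhead, hskip, htake]
            have := pvMXge ((pvT (PySem.List.pyRange (a + 1) (s.length : Int))).filterMap
              (fun t => pvVal s (s.length : Int) t prev seen))
            rw [show pvMX ([] : List Int) = -1 from rfl]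
            omega
          · have hgo := ihs (((s.length : Int) - a).toNat) (by omega) a
              (PySem.Set.add seen (PySem.List.slice s (some prev) (some a))) han rfl
            have htake : (pvT (PySem.List.pyRange (a + 1) (s.length : Int))).filterMap
                  (fun t => pvVal s (s.length : Int) (a :: t) prev seen)
                = ((pvT (PySem.List.pyRange (a + 1) (s.length : Int))).filterMap
                    (fun t => pvVal s (s.length : Int) t a
                      (PySem.Set.add seen (PySem.List.slice s (some prev) (some a))))).map (· + 1) := by
              rw [List.map_filterMap]
              apply List.filterMap_congr
              intro t _
              have hm := hc
              simp at hm
              rw [pvVal]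
              simp [hm]
            have hXpos : ∀ v ∈ (pvT (PySem.List.pyRange (a + 1) (s.length : Int))).filterMap
                (fun t => pvVal s (s.length : Int) t a
                  (PySem.Set.add seen (PySem.List.slice s (some prev) (some a)))), 1 ≤ v := by
              intro v hv
              obtain ⟨t, ht, hvv⟩ := List.mem_filterMap.mp hv
              exact pvValPos s (s.length : Int) t a _ v hvv
            rw [htake, pvMXmapSucc _ hXpos, ← hgo]
            by_cases hm1 : pvGoA s a (PySem.Set.add seen (PySem.List.slice s (some prev) (some a))) = -1
            · have hhead : pvCandA s prev seen a = none := by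
                rw [pvCandA, if_neg hc, if_neg (by simp [hm1])]
              rw [List.filterMap_cons_none hhead, hskip, if_pos hm1]
              have := pvMXge ((pvT (PySem.List.pyRange (a + 1) (s.length : Int))).filterMap
                (fun t => pvVal s (s.length : Int) t prev seen))
              omega
            · have hhead : pvCandA s prev seen a
                  = some (pvGoA s a (PySem.Set.add seen (PySem.List.slice s (some prev) (some a))) + 1) := by
                rw [pvCandA, if_neg hc, if_pos hm1]
              rw [List.filterMap_cons_some hhead, pvMXcons, hskip, if_neg hm1]
              omega
    rw [hstep0]
    exact hKEY (((s.length : Int) - (prev + 1)).toNat) (prev + 1) (by omega) (by omega) rfl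

-- B's frontier sweep plus final pass equals the max of pvVal over the subsets
lemma pvAltEq (t : List Char) (start : Int) (banned : PySem.Set (List Char)) :
    ((PySem.List.pyRange (start + 1) (t.length : Int)).foldl
        (fun states c => states ++ states.filterMap (pvExt t banned c))
        [(start, (PySem.Set.empty : PySem.Set (List Char)))]).foldl
      (fun best st =>
        let last := PySem.List.slice t (some st.1) (some (t.length : Int))
        if PySem.Set.contains banned last || PySem.Set.contains st.2 last then best
        else max best (((st.2.length : Int)) + 1)) (-1)
    = pvMX ((pvT (PySem.List.pyRange (start + 1) (t.length : Int))).filterMap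
        (fun chosen => pvVal t (t.length : Int) chosen start banned)) := by
  have hF : (fun (best : Int) (st : Int × PySem.Set (List Char)) =>
        let last := PySem.List.slice t (some st.1) (some (t.length : Int))
        if PySem.Set.contains banned last || PySem.Set.contains st.2 last then best
        else max best (((st.2.length : Int)) + 1))
      = (fun (best : Int) (st : Int × PySem.Set (List Char)) =>
          match pvFin t banned (t.length : Int) st with
          | none => best
          | some v => max best v) := by
    funext best st
    simp only [pvFin]
    split_ifs <;> rfl
  have hf : ∀ (st : Int × PySem.Set (List Char)) (v : Int),
      pvFin t banned (t.length : Int) st = some v → -1 ≤ v := by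
    intro st v h
    simp only [pvFin] at h
    split at h
    · exact absurd h (by simp)
    · obtain rfl : ((st.2.length : Int)) + 1 = v := Option.some_inj.mp h
      omega
  rw [pvFrontier, hF,
    pvFoldOptMax ((pvT (PySem.List.pyRange (start + 1) (t.length : Int))).filterMap
        (fun chosen => pvPWalk t banned chosen start PySem.Set.empty))
      (pvFin t banned (t.length : Int)) hf (-1) (by omega),
    List.filterMap_filterMap]
  have hequiv : ∀ ch ∈ pvT (PySem.List.pyRange (start + 1) (t.length : Int)),
      (pvPWalk t banned ch start PySem.Set.empty).bind (pvFin t banned (t.length : Int))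
        = pvVal t (t.length : Int) ch start banned := by
    intro ch _
    rw [pvPWalkEq]
    have h1 : (PySem.Set.empty : PySem.Set (List Char)).foldl PySem.Set.add banned = banned := rfl
    have h2 : ((PySem.Set.empty : PySem.Set (List Char)).length : Int) = 0 := rfl
    rw [h1]
    simp only [h2]
    cases pvVal t (t.length : Int) ch start banned <;> simp
  rw [List.filterMap_congr hequiv]
  have := pvMXge ((pvT (PySem.List.pyRange (start + 1) (t.length : Int))).filterMap
    (fun chosen => pvVal t (t.length : Int) chosen start banned))
  omega

-- ===== VERDICT (by name: the statement is the Claim_ definition above) =====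
theorem maxUniqueSplit_spec : Claim_equal_maxUniqueSplit := by
  intro s start seen _
  simp only [Spec_maxUniqueSplit, maxUniqueSplit, maxUniqueSplit_alt]
  by_cases h0 : start = ((s.toList.length : Nat) : Int)
  · rw [if_pos h0, pvGoA, if_pos h0]
  · rw [if_neg h0]
    by_cases h1 : ((s.toList.length : Nat) : Int) < start
    · rw [if_pos h1, pvGoA, if_neg h0, pvRangeNil _ _ (by omega)]
      rfl
    · rw [if_neg h1]
      rw [pvMain s.toList (((s.toList.length : Int) - start).toNat) start _ (by omega) rfl]
      exact (pvAltEq s.toList start _).symm
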